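-- pv_equiv track=rewrite | github.com/a-brandon/practice | edabit/two_product.py | two_product2
-- ===== SOURCE A (Python) =====
-- def two_product2(arr, n):
--     """O(N) time complexity solution.
--     Curious as to why this solution doesn't pass tests. First pair found was [72, 2600]?"""
--     i, j = 0, 0
--     while i < len(arr) - 1:
--         if j == len(arr):
--             i += 1
--             j = 0
--         curr_num, prod_num = arr[i], arr[j]
--         if prod_num == curr_num:
--             j += 1
--             continue
--         if curr_num * prod_num == n:
--             return [curr_num, prod_num]
--         j += 1
-- ===== SOURCE B (Python) =====
-- def two_product2(arr, n):
--     """O(N) hash-set solution: for each candidate first element a (last element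
--     excluded, as in the original scan), look up the exact cofactor n/a in a set
--     of all values instead of scanning the whole list again."""
--     vals = set(arr)
--     first_nonzero = next((x for x in arr if x != 0), None)
--     for a in arr[:-1]:
--         if a == 0:
--             if n == 0 and first_nonzero is not None:
--                 return [0, first_nonzero]
--         elif n % a == 0:
--             t = n // a
--             if t != a and t in vals:
--                 return [a, t]
--     return None
-- ===== Notes on version B (the rewrite author's own statement) =====
-- stated objective: faster
-- what changed: A's quadratic scan of all (i, j) index pairs is replaced by one pass over arr[:-1] that looks up the exact cofactor n/arr[i] (or, for arr[i] == 0, a precomputed first nonzero element) in a set built once; the redundant wrap-around probe of A's last row is dropped as provably dead.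
import Mathlib
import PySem

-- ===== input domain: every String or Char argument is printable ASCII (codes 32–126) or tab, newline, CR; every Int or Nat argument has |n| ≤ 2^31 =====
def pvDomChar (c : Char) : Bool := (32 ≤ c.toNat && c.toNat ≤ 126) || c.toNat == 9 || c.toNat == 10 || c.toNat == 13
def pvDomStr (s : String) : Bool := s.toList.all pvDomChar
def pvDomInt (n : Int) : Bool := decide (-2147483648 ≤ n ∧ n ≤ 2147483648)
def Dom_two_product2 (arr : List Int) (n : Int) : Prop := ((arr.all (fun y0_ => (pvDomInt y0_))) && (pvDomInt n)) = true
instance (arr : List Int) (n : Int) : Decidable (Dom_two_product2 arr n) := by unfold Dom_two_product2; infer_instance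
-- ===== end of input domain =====

-- B replaces A's quadratic nested index scan by a hash-set lookup of the exact cofactor n/a (objective: faster).

-- ===== PORT A =====
-- helper for termination of the literal while-loop port below
theorem pvGet_lt_len {α : Type} {xs : List α} {i : Int} {x : α}
    (h : PySem.List.pyGet? xs i = some x) : i < (xs.length : Int) := by
  by_contra hlt
  have hn : PySem.List.pyGet? xs i = none := by
    rw [PySem.List.pyGet?_eq_none_iff]
    intro hr
    exact hlt hr.2
  rw [h] at hn; simp at hn

-- literal port of A's while-loop: state (i, j); `j == len(arr)` advances the row;
-- the unreachable `| _, _ => none` arms correspond to an IndexError Python never reaches here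
def loopA (arr : List Int) (n : Int) (i j : Int) : Option (List Int) :=
  if hc : i < (arr.length : Int) - 1 then
    match h1 : PySem.List.pyGet? arr (if j = (arr.length : Int) then i + 1 else i),
          h2 : PySem.List.pyGet? arr (if j = (arr.length : Int) then 0 else j) with
    | some curr, some prod =>
      if prod = curr then
        loopA arr n (if j = (arr.length : Int) then i + 1 else i)
                    ((if j = (arr.length : Int) then 0 else j) + 1)
      else if curr * prod = n then some [curr, prod]
      else
        loopA arr n (if j = (arr.length : Int) then i + 1 else i)
                    ((if j = (arr.length : Int) then 0 else j) + 1)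
    | _, _ => none
  else none
termination_by (((arr.length : Int) + 1 - i).toNat, ((arr.length : Int) + 1 - j).toNat)
decreasing_by
  · by_cases hj : j = (arr.length : Int)
    · simp [hj] at *
      exact Prod.Lex.left _ _ (by omega)
    · simp [hj] at *
      have := pvGet_lt_len h2
      exact Prod.Lex.right _ (by omega)
  · by_cases hj : j = (arr.length : Int)
    · simp [hj] at *
      exact Prod.Lex.left _ _ (by omega)
    · simp [hj] at *
      have := pvGet_lt_len h2
      exact Prod.Lex.right _ (by omega)

def two_product2 (arr : List Int) (n : Int) : Option (List Int) :=
  loopA arr n 0 0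

-- ===== PORT B =====
-- loop of Source B over arr[:-1], with vals = set(arr) and first_nonzero precomputed
def altFind (vals : PySem.Set Int) (fnz : Option Int) (n : Int) : List Int → Option (List Int)
  | [] => none
  | a :: rest =>
    if a = 0 then
      if n = 0 then
        match fnz with
        | some x => some [0, x]
        | none => altFind vals fnz n rest
      else altFind vals fnz n rest
    else if PySem.Int.mod n a = 0 then
      if PySem.Int.floordiv n a ≠ a ∧ PySem.Set.contains vals (PySem.Int.floordiv n a) = true then
        some [a, PySem.Int.floordiv n a]
      else altFind vals fnz n rest
    else altFind vals fnz n rest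

-- set(arr) → PySem.Set.ofList; next((x for x in arr if x != 0), None) → List.find?; arr[:-1] → dropLast
def two_product2_alt (arr : List Int) (n : Int) : Option (List Int) :=
  altFind (PySem.Set.ofList arr) (arr.find? (fun x => x != 0)) n arr.dropLast

-- ===== PRECONDITION & SPEC =====
def Spec_two_product2 (arr : List Int) (n : Int) (out : Option (List Int)) : Prop := out = two_product2_alt arr n
instance (arr : List Int) (n : Int) (out : Option (List Int)) : Decidable (Spec_two_product2 arr n out) := by unfold Spec_two_product2; infer_instance

-- ===== CLAIM (what is proved, stated in full; the proofs are below) =====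
def Claim_equal_two_product2 : Prop := ∀ (arr : List Int) (n : Int), Dom_two_product2 arr n → Spec_two_product2 arr n (two_product2 arr n)

-- ===== LEMMAS AND PROOFS =====

-- predicate of A's inner row scan at first element a
def predRow (n a : Int) : Int → Bool := fun p => (p != a) && (a * p == n)

-- a·x = n has the unique solution x = n // a when a ∣ n (a ≠ 0)
theorem pv_div_char (n a x : Int) (ha : a ≠ 0) :
    a * x = n ↔ (PySem.Int.mod n a = 0 ∧ x = PySem.Int.floordiv n a) := by
  constructor
  · intro h
    have hm : PySem.Int.mod n a = 0 := (PySem.Int.mod_eq_zero_iff_dvd n a).mpr ⟨x, h.symm⟩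
    have hfd := PySem.Int.floordiv_mul_add_mod n a
    rw [hm, add_zero] at hfd
    have : a * PySem.Int.floordiv n a = a * x := by rw [mul_comm a _, hfd, h]
    exact ⟨hm, (mul_left_cancel₀ ha this).symm⟩
  · rintro ⟨hm, rfl⟩
    have hfd := PySem.Int.floordiv_mul_add_mod n a
    rw [hm, add_zero] at hfd
    rw [mul_comm]; exact hfd

-- the row scan for a = 0 is the first-nonzero scan when n = 0, empty otherwise
theorem pv_row_zero (n : Int) (l : List Int) :
    l.find? (predRow n 0) = if n = 0 then l.find? (fun x => x != 0) else none := by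
  induction l with
  | nil => simp
  | cons x xs ih =>
    rw [List.find?_cons]
    by_cases hn : n = 0
    · subst hn
      by_cases hx : x = 0
      · simp [predRow, hx, ih]
      · have hpred : predRow 0 0 x = true := by simp [predRow, hx]
        rw [hpred, List.find?_cons, bne_iff_ne.mpr hx]
        simp
    · have hpred : predRow n 0 x = false := by
        simp [predRow]; omega
      rw [hpred, ih]
      simp [hn]

-- the row scan for a ≠ 0 finds exactly the cofactor n // a
theorem pv_row_nonzero (n a : Int) (ha : a ≠ 0) (l : List Int) :
    l.find? (predRow n a) =
      if PySem.Int.mod n a = 0 ∧ PySem.Int.floordiv n a ≠ a ∧ PySem.Int.floordiv n a ∈ l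
      then some (PySem.Int.floordiv n a) else none := by
  induction l with
  | nil => simp
  | cons x xs ih =>
    rw [List.find?_cons]
    by_cases hm : PySem.Int.mod n a = 0
    · by_cases hx : x = PySem.Int.floordiv n a
      · by_cases hta : PySem.Int.floordiv n a = a
        · have hpred : predRow n a x = false := by simp [predRow, hx, hta]
          rw [hpred, ih]
          simp [hta]
        · have hax : a * x = n := (pv_div_char n a x ha).mpr ⟨hm, hx⟩
          have hax' : a * PySem.Int.floordiv n a = n := hx ▸ hax
          have hpred : predRow n a x = true := by simp [predRow, hx, hta, hax']
          rw [hpred]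
          simp [hm, hta, hx]
      · have hax : ¬ a * x = n := fun h => hx ((pv_div_char n a x ha).mp h).2
        have hpred : predRow n a x = false := by simp [predRow, hax]
        rw [hpred, ih]
        rcases Decidable.em (PySem.Int.floordiv n a ∈ xs) with hmem | hmem <;>
          simp [hm, hmem, Ne.symm hx]
    · have hax : ¬ a * x = n := fun h => hm ((pv_div_char n a x ha).mp h).1
      have hpred : predRow n a x = false := by simp [predRow, hax]
      rw [hpred, ih]
      simp [hm]

-- A's inner loop from column j is the first predRow match in arr.drop j
theorem pv_row_scan (arr : List Int) (n i a : Int)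
    (hiU : i < (arr.length : Int) - 1)
    (ha : PySem.List.pyGet? arr i = some a) :
    ∀ (k : Nat) (j : Int), 0 ≤ j → j + (k : Int) = (arr.length : Int) →
      loopA arr n i j =
        (match (arr.drop j.toNat).find? (predRow n a) with
         | some p => some [a, p]
         | none => loopA arr n i (arr.length : Int)) := by
  intro k
  induction k with
  | zero =>
    intro j hj0 hjk
    have hj : j = (arr.length : Int) := by omega
    subst hj
    have : ((arr.length : Int)).toNat = arr.length := by omega
    rw [this, List.drop_length]
    simp
  | succ k ih =>
    intro j hj0 hjk
    have hjL : j < (arr.length : Int) := by push_cast at hjk ⊢; omega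
    have hjn : j.toNat < arr.length := by omega
    have hgj : PySem.List.pyGet? arr j = some (arr[j.toNat]) :=
      PySem.List.pyGet?_eq_some_getElem _ hj0 hjL
    have hdrop : arr.drop j.toNat = arr[j.toNat] :: arr.drop (j.toNat + 1) :=
      List.drop_eq_getElem_cons hjn
    have hjne : ¬ (j = (arr.length : Int)) := by omega
    rw [loopA, dif_pos hiU]
    simp only [if_neg hjne]
    have htn : (j + 1).toNat = j.toNat + 1 := by omega
    split
    next curr prod h1 h2 =>
      rw [if_neg hjne] at h1 h2
      rw [ha, Option.some.injEq] at h1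
      rw [hgj, Option.some.injEq] at h2
      subst h1; subst h2
      rw [hdrop, List.find?_cons]
      by_cases hpa : arr[j.toNat] = a
      · have hpred : predRow n a arr[j.toNat] = false := by simp [predRow, hpa]
        rw [if_pos hpa, hpred, ih (j + 1) (by omega) (by push_cast at hjk ⊢; omega), htn]
      · by_cases hprod : a * arr[j.toNat] = n
        · have hpred : predRow n a arr[j.toNat] = true := by simp [predRow, hpa, hprod]
          rw [if_neg hpa, if_pos hprod, hpred]
        · have hpred : predRow n a arr[j.toNat] = false := by simp [predRow, hpa, hprod]
          rw [if_neg hpa, if_neg hprod, hpred,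
              ih (j + 1) (by omega) (by push_cast at hjk ⊢; omega), htn]
    next h =>
      rw [if_neg hjne, if_neg hjne] at h
      exact absurd hgj (fun hg => h a arr[j.toNat] ha hg)

-- end of a non-final row: move to the next row
theorem pv_row_step (arr : List Int) (n i : Int) (h : i + 1 < (arr.length : Int) - 1)
    (hlen : 0 < arr.length) :
    loopA arr n i (arr.length : Int) = loopA arr n (i + 1) 0 := by
  rw [loopA]; conv_rhs => rw [loopA]
  have hi : i < (arr.length : Int) - 1 := by omega
  have h0 : ¬ ((0 : Int) = (arr.length : Int)) := by omega
  rw [dif_pos hi, dif_pos h, if_pos rfl, if_pos rfl, if_neg h0, if_neg h0]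

-- end of the second-to-last row: the leftover (last, first) probe never fires, because
-- row 0 already rejected that product (multiplication commutes)
theorem pv_row_last (arr : List Int) (n : Int) (h2 : 2 ≤ arr.length)
    (a0 : Int) (h0 : PySem.List.pyGet? arr 0 = some a0)
    (hrow0 : arr.find? (predRow n a0) = none) :
    loopA arr n ((arr.length : Int) - 2) (arr.length : Int) = none := by
  have hb : PySem.List.pyGet? arr ((arr.length : Int) - 2 + 1) = some (arr[arr.length - 1]'(by omega)) := by
    have h1 := PySem.List.pyGet?_eq_some_getElem arr (i := (arr.length : Int) - 2 + 1) (by omega) (by omega)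
    have ht : ((arr.length : Int) - 2 + 1).toNat = arr.length - 1 := by omega
    simpa [ht] using h1
  rw [loopA, dif_pos (by omega : (arr.length : Int) - 2 < (arr.length : Int) - 1)]
  rw [if_pos rfl, if_pos rfl]
  split
  next curr prod h1 h2' =>
    rw [hb, Option.some.injEq] at h1
    rw [h0, Option.some.injEq] at h2'
    subst h1; subst h2'
    by_cases heq : a0 = arr[arr.length - 1]'(by omega)
    · rw [if_pos heq, loopA, dif_neg (by omega : ¬ ((arr.length : Int) - 2 + 1 < (arr.length : Int) - 1))]
    · rw [if_neg heq]
      have hmem : (arr[arr.length - 1]'(by omega)) ∈ arr := List.getElem_mem _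
      have hnp := List.find?_eq_none.mp hrow0 _ hmem
      have : ¬ ((arr[arr.length - 1]'(by omega)) * a0 = n) := by
        intro hn
        apply hnp
        simp only [predRow, Bool.and_eq_true, bne_iff_ne, beq_iff_eq]
        exact ⟨fun hh => heq hh.symm, by rw [mul_comm]; exact hn⟩
      rw [if_neg this, loopA, dif_neg (by omega : ¬ ((arr.length : Int) - 2 + 1 < (arr.length : Int) - 1))]
  next h =>
    exact absurd h0 (fun hg => h _ _ hb hg)

-- set membership bridge
theorem pv_contains (arr : List Int) (t : Int) :
    (PySem.Set.contains (PySem.Set.ofList arr) t = true) ↔ t ∈ arr := by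
  simp [PySem.Set.contains, PySem.Set.mem_ofList]

-- one step of B's loop computes exactly the row scan's answer for a = arr[i]
theorem pv_row_alt (arr : List Int) (n : Int) (i : Nat) (hi : i + 1 < arr.length) :
    altFind (PySem.Set.ofList arr) (arr.find? (fun x => x != 0)) n (arr.dropLast.drop i) =
      (match arr.find? (predRow n (arr[i]'(by omega))) with
       | some p => some [(arr[i]'(by omega)), p]
       | none => altFind (PySem.Set.ofList arr) (arr.find? (fun x => x != 0)) n (arr.dropLast.drop (i + 1))) := by
  have hdl : i < arr.dropLast.length := by simp [List.length_dropLast]; omega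
  have hstep : arr.dropLast.drop i = (arr[i]'(by omega)) :: arr.dropLast.drop (i + 1) := by
    rw [List.drop_eq_getElem_cons hdl]
    congr 1
    exact List.getElem_dropLast ..
  rw [hstep]
  by_cases ha0 : (arr[i]'(by omega)) = 0
  · rw [ha0, pv_row_zero]
    by_cases hn : n = 0
    · cases hf : arr.find? (fun x => x != 0) <;>
        simp [altFind, hn, hf]
    · simp [altFind, hn]
  · rw [pv_row_nonzero n _ ha0]
    by_cases hm : PySem.Int.mod n (arr[i]'(by omega)) = 0
    · by_cases hc : PySem.Int.floordiv n (arr[i]'(by omega)) ≠ (arr[i]'(by omega)) ∧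
          PySem.Int.floordiv n (arr[i]'(by omega)) ∈ arr
      · simp [altFind, ha0, hm, hc.1, hc.2, (pv_contains arr _).mpr hc.2]
      · have hcond : ¬ (PySem.Int.mod n (arr[i]'(by omega)) = 0 ∧
            PySem.Int.floordiv n (arr[i]'(by omega)) ≠ (arr[i]'(by omega)) ∧
            PySem.Int.floordiv n (arr[i]'(by omega)) ∈ arr) := by tauto
        rw [if_neg hcond]
        simp only [altFind, if_neg ha0, if_pos hm]
        rw [if_neg (by intro hand; exact hc ⟨hand.1, (pv_contains arr _).mp hand.2⟩)]
    · simp [altFind, ha0, hm]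

-- the two loops agree row by row
theorem pv_main (arr : List Int) (n : Int) :
    ∀ (k i : Nat), (i : Int) < (arr.length : Int) - 1 → i + k + 2 = arr.length →
      (i = 0 ∨ ∃ a0, PySem.List.pyGet? arr 0 = some a0 ∧ arr.find? (predRow n a0) = none) →
      loopA arr n i 0 =
        altFind (PySem.Set.ofList arr) (arr.find? (fun x => x != 0)) n (arr.dropLast.drop i) := by
  intro k
  induction k with
  | zero =>
    intro i hi hik hyp
    have hi1 : i + 1 < arr.length := by omega
    have ha : PySem.List.pyGet? arr (i : Int) = some (arr[i]'(by omega)) := by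
      rw [PySem.List.pyGet?_natCast]; exact List.getElem?_eq_getElem (by omega)
    have hscan := pv_row_scan arr n i (arr[i]'(by omega)) (by push_cast; omega) ha
      arr.length 0 le_rfl (by push_cast; omega)
    simp only [Int.toNat_zero, List.drop_zero] at hscan
    rw [hscan, pv_row_alt arr n i hi1]
    cases hfa : arr.find? (predRow n (arr[i]'(by omega))) with
    | some p => rfl
    | none =>
      have hnil : arr.dropLast.drop (i + 1) = [] :=
        List.drop_eq_nil_of_le (by simp [List.length_dropLast]; omega)
      have hlast : loopA arr n ((arr.length : Int) - 2) (arr.length : Int) = none := by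
        rcases hyp with rfl | ⟨a0, h0, hrow0⟩
        · exact pv_row_last arr n (by omega) _ (by simpa using ha) hfa
        · exact pv_row_last arr n (by omega) a0 h0 hrow0
      have hieq : ((i : Nat) : Int) = (arr.length : Int) - 2 := by omega
      rw [hieq, hlast, hnil]
      simp [altFind]
  | succ k ih =>
    intro i hi hik hyp
    have hi1 : i + 1 < arr.length := by omega
    have ha : PySem.List.pyGet? arr (i : Int) = some (arr[i]'(by omega)) := by
      rw [PySem.List.pyGet?_natCast]; exact List.getElem?_eq_getElem (by omega)
    have hscan := pv_row_scan arr n i (arr[i]'(by omega)) (by push_cast; omega) ha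
      arr.length 0 le_rfl (by push_cast; omega)
    simp only [Int.toNat_zero, List.drop_zero] at hscan
    rw [hscan, pv_row_alt arr n i hi1]
    cases hfa : arr.find? (predRow n (arr[i]'(by omega))) with
    | some p => rfl
    | none =>
      have hstep := pv_row_step arr n (i : Int) (by push_cast; omega) (by omega)
      have hih := ih (i + 1) (by push_cast; omega) (by omega) ?_
      · rw [hstep]
        rw [show ((i : Nat) : Int) + 1 = (((i + 1 : Nat)) : Int) by push_cast; ring]
        exact hih
      · right
        rcases hyp with rfl | ⟨a0, h0, hrow0⟩
        · exact ⟨_, by simpa using ha, hfa⟩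
        · exact ⟨a0, h0, hrow0⟩

theorem two_product2_spec : Claim_equal_two_product2 := by
  intro arr n _
  unfold Spec_two_product2 two_product2 two_product2_alt
  by_cases hlen : 2 ≤ arr.length
  · have := pv_main arr n (arr.length - 2) 0 (by push_cast; omega) (by omega) (Or.inl rfl)
    simpa using this
  · -- fewer than two elements: both sides are immediately none
    rw [loopA, dif_neg (by push_cast; omega)]
    cases arr with
    | nil => rfl
    | cons x xs =>
      cases xs with
      | nil => rfl
      | cons y ys => simp at hlen
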